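-- pv_equiv track=rewrite | github.com/beavelar/mock-bot | src/util/mock.py | mock
-- ===== SOURCE A (Python) =====
-- def mock(message: str) -> str:
--     """
--     Mocks the provided message by capitalizing every other letter
--     """
--     result = ""
--     capitalize = True
--     for character in message:
--         new_character = character
--         if character != " ":
--             if capitalize:
--                 new_character = character.upper()
--             else:
--                 new_character = character.lower()
--             capitalize = not capitalize
--         result += new_character
--     return result
-- ===== SOURCE B (Python) =====
-- def mock(message: str) -> str:
--     letters = [c for c in message if c != " "]
--     mocked = [c.upper() if i % 2 == 0 else c.lower() for i, c in enumerate(letters)]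
--     it = iter(mocked)
--     return "".join(" " if c == " " else next(it) for c in message)
-- ===== Notes on version B (the rewrite author's own statement) =====
-- stated objective: alternative
-- what changed: Replaces the single stateful capitalize-toggle loop with an extract/transform/merge decomposition: collect non-space characters, case them by index parity, then merge them back over the original string.
import Mathlib
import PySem

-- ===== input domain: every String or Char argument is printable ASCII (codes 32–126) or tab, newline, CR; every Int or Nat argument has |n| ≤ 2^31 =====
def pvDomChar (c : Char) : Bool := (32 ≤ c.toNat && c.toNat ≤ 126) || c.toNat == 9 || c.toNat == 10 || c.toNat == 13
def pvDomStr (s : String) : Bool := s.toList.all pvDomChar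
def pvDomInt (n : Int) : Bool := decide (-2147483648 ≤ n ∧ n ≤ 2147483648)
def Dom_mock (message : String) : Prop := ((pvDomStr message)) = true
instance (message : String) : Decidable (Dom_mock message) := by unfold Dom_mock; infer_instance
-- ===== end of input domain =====

-- B replaces A's single stateful capitalize-toggle loop by an extract/transform/merge
-- decomposition (filter non-spaces, case by index parity, merge back); alternative, same cost.


-- ===== PORT A =====
-- A's loop: one pass with a boolean `capitalize` toggle
def mockGo : List Char → Bool → List Char
  | [], _ => []
  | c :: rest, cap =>
    if c ≠ ' ' then
      (if cap then PySem.Chars.upperChar c else PySem.Chars.lowerChar c) :: mockGo rest (!cap)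
    else
      c :: mockGo rest cap

def mock (message : String) : String := String.mk (mockGo message.toList true)

-- ===== PORT B =====
-- B's merge pass: emit spaces literally, otherwise pull the next mocked char (the iterator)
def mergeGo : List Char → List Char → List Char
  | [], _ => []
  | c :: rest, it =>
    if c = ' ' then ' ' :: mergeGo rest it
    else
      match it with
      | t :: it' => t :: mergeGo rest it'
      | [] => []   -- unreachable: mocked has one char per non-space char

def mock_alt (message : String) : String :=
  let letters := message.toList.filter (fun c => c ≠ ' ')
  let mocked := (PySem.List.enumerate letters).map
    (fun p => if p.1 % 2 == 0 then PySem.Chars.upperChar p.2 else PySem.Chars.lowerChar p.2)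
  String.mk (mergeGo message.toList mocked)

-- ===== PRECONDITION & SPEC =====
def Spec_mock (message : String) (out : String) : Prop := out = mock_alt message
instance (message : String) (out : String) : Decidable (Spec_mock message out) := by unfold Spec_mock; infer_instance

-- ===== CLAIM (what is proved, stated in full; the proofs are below) =====
def Claim_equal_mock : Prop := ∀ (message : String), Dom_mock message → Spec_mock message (mock message)

-- ===== LEMMAS AND PROOFS =====

-- alternating casing starting with parity `b`
def altCase : Bool → List Char → List Char
  | _, [] => []
  | b, c :: rest =>
    (if b then PySem.Chars.upperChar c else PySem.Chars.lowerChar c) :: altCase (!b) rest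

theorem enumerate_map_eq_altCase (xs : List Char) (s : Int) :
    (PySem.List.enumerate xs s).map
      (fun p => if p.1 % 2 == 0 then PySem.Chars.upperChar p.2 else PySem.Chars.lowerChar p.2)
    = altCase (s % 2 == 0) xs := by
  induction xs generalizing s with
  | nil => simp [PySem.List.enumerate_nil, altCase]
  | cons c rest ih =>
    simp only [PySem.List.enumerate_cons, List.map_cons, ih, altCase]
    congr 1
    have : ((s + 1) % 2 == 0) = !(s % 2 == 0) := by
      rcases Int.emod_two_eq_zero_or_one s with h | h <;>
        simp [h, Int.add_emod]
    rw [this]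

theorem mockGo_eq_merge (l : List Char) (b : Bool) :
    mockGo l b = mergeGo l (altCase b (l.filter (fun c => c ≠ ' '))) := by
  induction l generalizing b with
  | nil => simp [mockGo, mergeGo]
  | cons c rest ih =>
    by_cases hc : c = ' '
    · subst hc
      simp [mockGo, mergeGo, ih]
    · simp [mockGo, mergeGo, hc, altCase, ih]

-- ===== VERDICT (by name: the statement is the Claim_ definition above) =====
theorem mock_spec : Claim_equal_mock := by
  intro message _
  unfold Spec_mock mock mock_alt
  simp only [enumerate_map_eq_altCase, show ((0:Int) % 2 == 0) = true from rfl,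
    mockGo_eq_merge]
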